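-- pv_equiv track=rewrite | github.com/elizajasin/documents_classification_ANN | FeatureExtraction.py | sumFE
-- ===== SOURCE A (Python) =====
-- def sumFE (data, atribut):
--     for i in range(len(data)):
--         for key in atribut:
--             atribut[key].append(0)
--         for j in range(len(data[i])):
--             if data[i][j] in atribut.keys():
--                 atribut[data[i][j]][i] += 1
--     return atribut
-- ===== SOURCE B (Python) =====
-- def sumFE(data, atribut):
--     n = len(data)
--     counts = []
--     for doc in data:
--         c = {}
--         for t in doc:
--             c[t] = c.get(t, 0) + 1
--         counts.append(c)
--     for key in atribut:
--         lst = atribut[key]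
--         lst.extend([0] * n)
--         for i in range(n):
--             lst[i] += counts[i].get(key, 0)
--     return atribut
-- ===== Notes on version B (the rewrite author's own statement) =====
-- stated objective: alternative
-- what changed: A interleaves, per document, an append-0 pass over all attribute lists with a per-token increment loop; B first precomputes a count dict per document, then pre-extends every attribute list by len(data) zeros in one step and fills it key-major with one aggregated addition per (key, document) pair.
import Mathlib
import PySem

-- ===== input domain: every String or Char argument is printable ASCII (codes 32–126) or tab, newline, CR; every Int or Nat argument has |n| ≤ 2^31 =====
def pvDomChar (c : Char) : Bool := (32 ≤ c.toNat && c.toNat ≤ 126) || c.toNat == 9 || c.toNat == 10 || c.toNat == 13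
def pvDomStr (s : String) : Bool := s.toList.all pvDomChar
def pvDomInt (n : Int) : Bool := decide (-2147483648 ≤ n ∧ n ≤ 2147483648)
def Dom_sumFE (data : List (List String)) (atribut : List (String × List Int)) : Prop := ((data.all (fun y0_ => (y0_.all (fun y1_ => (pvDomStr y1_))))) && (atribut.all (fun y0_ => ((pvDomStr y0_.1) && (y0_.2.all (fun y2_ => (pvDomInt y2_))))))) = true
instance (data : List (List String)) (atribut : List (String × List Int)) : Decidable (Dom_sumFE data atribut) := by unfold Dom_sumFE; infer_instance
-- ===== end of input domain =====

-- B replaces A's per-document interleaved append-then-increment with a per-document count pass plus a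
-- key-major fill pass (alternative decomposition, same cost). Python A and B mutate `atribut` in place
-- in the same way; the equivalence proved here is about the returned value.


-- ===== PORT A =====
-- `atribut[k] = f(atribut[k])` on a Python dict, modelled on the assoc list: modify the first entry with key k
def modFirst (k : String) (f : List Int → List Int) : List (String × List Int) → List (String × List Int)
  | [] => []
  | (k', v) :: t => if k' = k then (k', f v) :: t else (k', v) :: modFirst k f t

-- `if data[i][j] in atribut.keys(): atribut[data[i][j]][i] += 1`; the index i is always in range in A
-- (each list has been extended i+1 times before the increment), so set/getD is exact here
def stepTok (i : Nat) (d : List (String × List Int)) (t : String) : List (String × List Int) :=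
  if d.any (fun p => p.1 == t) then modFirst t (fun l => l.set i (l.getD i 0 + 1)) d else d

def sumFE (data : List (List String)) (atribut : List (String × List Int)) : List (String × List Int) :=
  (data.zipIdx).foldl
    (fun d p =>
      p.1.foldl (stepTok p.2) (d.map (fun q => (q.1, q.2 ++ [0]))))
    atribut

-- ===== PORT B =====
-- c.get(t, 0) on the per-document count dict
def cGet (c : List (String × Int)) (t : String) : Int :=
  match c.find? (fun p => p.1 == t) with
  | some p => p.2
  | none => 0

-- c[t] = v on the per-document count dict (overwrite in place, new keys append)
def cSet : List (String × Int) → String → Int → List (String × Int)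
  | [], t, v => [(t, v)]
  | (k, w) :: r, t, v => if k = t then (t, v) :: r else (k, w) :: cSet r t v

def counterOf (doc : List String) : List (String × Int) :=
  doc.foldl (fun c t => cSet c t (cGet c t + 1)) []

def sumFE_alt (data : List (List String)) (atribut : List (String × List Int)) : List (String × List Int) :=
  let n := data.length
  let counts := data.map counterOf
  atribut.map (fun p =>
    (p.1, (counts.zipIdx).foldl (fun l q => l.set q.2 (l.getD q.2 0 + cGet q.1 p.1))
            (p.2 ++ List.replicate n 0)))

-- ===== PRECONDITION & SPEC =====
-- atribut models a Python dict, whose keys are distinct: assoc lists with duplicate keys represent no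
-- dict input at all (Python A never receives one), so they are excluded; no actual Python input is lost.
def Pre_sumFE (data : List (List String)) (atribut : List (String × List Int)) : Prop :=
  (atribut.map Prod.fst).Nodup

instance (data : List (List String)) (atribut : List (String × List Int)) : Decidable (Pre_sumFE data atribut) := by unfold Pre_sumFE; infer_instance

def pvWitness_sumFE : List (List String) × (List (String × List Int)) :=
  ([["a", "b"], ["a"]], [("a", [5]), ("c", [])])

def Spec_sumFE (data : List (List String)) (atribut : List (String × List Int)) (out : List (String × List Int)) : Prop := out = sumFE_alt data atribut
instance (data : List (List String)) (atribut : List (String × List Int)) (out : List (String × List Int)) : Decidable (Spec_sumFE data atribut out) := by unfold Spec_sumFE; infer_instance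

-- ===== CLAIM (what is proved, stated in full; the proofs are below) =====
def Claim_equal_sumFE : Prop := ∀ (data : List (List String)) (atribut : List (String × List Int)), Dom_sumFE data atribut → Pre_sumFE data atribut → Spec_sumFE data atribut (sumFE data atribut)

-- ===== LEMMAS AND PROOFS =====

-- proof-side abbreviation: add c at index i ("l[i] += c"; a no-op past the end)
def inc (i : Nat) (c : Int) (l : List Int) : List Int := l.set i (l.getD i 0 + c)

theorem inc_zero (i : Nat) (l : List Int) : inc i 0 l = l := by
  unfold inc
  by_cases h : i < l.length
  · simp [List.getD, List.getElem?_eq_getElem h, List.set_getElem_self h]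
  · exact List.set_eq_of_length_le (by omega)

theorem inc_inc (i : Nat) (a b : Int) (l : List Int) : inc i a (inc i b l) = inc i (b + a) l := by
  unfold inc
  by_cases h : i < l.length
  · simp [List.getD, List.set_set, List.getElem?_set_self', List.getElem?_eq_getElem h, add_assoc]
  · have h1 : l.set i (l.getD i 0 + b) = l := List.set_eq_of_length_le (by omega)
    rw [h1, List.set_eq_of_length_le (by omega), List.set_eq_of_length_le (by omega)]

theorem inc_append (i : Nat) (c : Int) (l t : List Int) (h : i < l.length) :
    inc i c (l ++ t) = inc i c l ++ t := by
  unfold inc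
  rw [List.set_append_left _ _ h]
  simp [List.getD, List.getElem?_append_left h]

-- A's increment acts entrywise on a dup-free assoc list
theorem map_id_of_fixed (d : List (String × List Int)) (t : String)
    (f : List Int → List Int) (hf : ∀ p ∈ d, ¬ (p.1 = t)) :
    d.map (fun p => (p.1, if p.1 = t then f p.2 else p.2)) = d := by
  conv_rhs => rw [← List.map_id d]
  exact List.map_congr_left (fun p hp => by simp [hf p hp])

theorem modFirst_eq_map (t : String) (f : List Int → List Int) (d : List (String × List Int))
    (h : (d.map Prod.fst).Nodup) (ht : d.any (fun p => p.1 == t)) :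
    modFirst t f d = d.map (fun p => (p.1, if p.1 = t then f p.2 else p.2)) := by
  induction d with
  | nil => simp at ht
  | cons q r ih =>
    obtain ⟨k, v⟩ := q
    simp only [List.map_cons, List.nodup_cons, List.mem_map] at h
    by_cases hk : k = t
    · subst hk
      have hr : ∀ p ∈ r, ¬ (p.1 = k) := fun p hp hpk => h.1 ⟨p, hp, hpk⟩
      simp [modFirst, map_id_of_fixed r k f hr]
    · replace ht : r.any (fun p => p.1 == t) := by simpa [hk] using ht
      simp only [modFirst, if_neg hk, List.map_cons]
      exact congrArg _ (ih h.2 ht)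

theorem stepTok_eq_map (i : Nat) (t : String) (d : List (String × List Int))
    (h : (d.map Prod.fst).Nodup) :
    stepTok i d t = d.map (fun p => (p.1, if p.1 = t then inc i 1 p.2 else p.2)) := by
  unfold stepTok
  by_cases ha : d.any (fun p => p.1 == t)
  · rw [if_pos ha, modFirst_eq_map t _ d h ha]; rfl
  · rw [if_neg ha]
    have hf : ∀ p ∈ d, ¬ (p.1 = t) := by
      intro p hp hpt
      exact ha (List.any_eq_true.mpr ⟨p, hp, by simp [hpt]⟩)
    rw [map_id_of_fixed d t _ hf]

-- the token loop of one document acts entrywise, adding the token count at index i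
theorem tokLoop_eq_map (i : Nat) (doc : List String) (d : List (String × List Int))
    (h : (d.map Prod.fst).Nodup) :
    doc.foldl (stepTok i) d = d.map (fun p => (p.1, inc i ((doc.count p.1 : Nat) : Int) p.2)) := by
  induction doc generalizing d with
  | nil => simp [inc_zero]
  | cons t rest ih =>
    simp only [List.foldl_cons]
    rw [stepTok_eq_map i t d h, ih _ (by simpa using h), List.map_map]
    refine List.map_congr_left (fun p _ => ?_)
    simp only [Function.comp]
    by_cases hpt : p.1 = t
    · rw [if_pos hpt, inc_inc, hpt, List.count_cons_self]
      push_cast; rw [add_comm]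
    · rw [if_neg hpt]
      simp [List.count_cons, Ne.symm hpt]

-- A's outer loop acts entrywise
theorem sumFE_loop_eq_map (ps : List (List String × Nat)) (d : List (String × List Int))
    (h : (d.map Prod.fst).Nodup) :
    ps.foldl (fun d p => p.1.foldl (stepTok p.2) (d.map (fun q => (q.1, q.2 ++ [0])))) d
      = d.map (fun q => (q.1, ps.foldl (fun v p => inc p.2 ((p.1.count q.1 : Nat) : Int) (v ++ [0])) q.2)) := by
  induction ps generalizing d with
  | nil => simp
  | cons p ps ih =>
    simp only [List.foldl_cons]
    have hk : ((d.map (fun q => (q.1, q.2 ++ [0]))).map Prod.fst).Nodup := by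
      simpa [List.map_map, Function.comp] using h
    rw [tokLoop_eq_map p.2 p.1 _ hk, List.map_map,
        ih _ (by simpa [List.map_map, Function.comp] using h), List.map_map]
    exact List.map_congr_left (fun q _ => by simp [Function.comp])

-- B's per-document counter is exact: counts[i].get(k, 0) = data[i].count(k)
theorem cGet_cons (k' k : String) (w : Int) (r : List (String × Int)) :
    cGet ((k', w) :: r) k = if k' = k then w else cGet r k := by
  by_cases h : k' = k
  · subst h; simp [cGet, List.find?]
  · simp only [cGet, List.find?]
    rw [show (k' == k) = false from by simp [h]]
    simp [cGet, h]

theorem cGet_cSet (c : List (String × Int)) (t k : String) (v : Int) :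
    cGet (cSet c t v) k = if k = t then v else cGet c k := by
  induction c with
  | nil =>
    by_cases h : k = t
    · simp [cSet, cGet, List.find?, beq_iff_eq, h]
    · simp [cSet, cGet, List.find?, beq_iff_eq, h, Ne.symm h]
  | cons q r ih =>
    obtain ⟨k', w⟩ := q
    by_cases h1 : k' = t
    · subst h1
      by_cases h2 : k = k'
      · subst h2; simp [cSet, cGet_cons]
      · have h3 : ¬ k' = k := fun hh => h2 hh.symm
        simp [cSet, cGet_cons, h2, h3]
    · by_cases h2 : k = k'
      · subst h2
        simp [cSet, h1, cGet_cons, fun hh : k = t => h1 hh]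
      · have h3 : ¬ k' = k := fun hh => h2 hh.symm
        simp [cSet, h1, cGet_cons, h2, h3, ih]

theorem cGet_counter_loop (doc : List String) (c : List (String × Int)) (k : String) :
    cGet (doc.foldl (fun c t => cSet c t (cGet c t + 1)) c) k = cGet c k + (doc.count k : Int) := by
  induction doc generalizing c with
  | nil => simp
  | cons t rest ih =>
    simp only [List.foldl_cons, ih, cGet_cSet]
    by_cases h : k = t
    · subst h; simp [List.count_cons_self]; push_cast; ring
    · simp [h, List.count_cons, Ne.symm h]

theorem cGet_counterOf (doc : List String) (k : String) :
    cGet (counterOf doc) k = (doc.count k : Int) := by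
  simpa [counterOf, cGet, List.find?] using cGet_counter_loop doc [] k

-- interleaved append-then-increment = pre-extend by all the zeros, then increment
theorem interleave (cs : List Int) (v : List Int) (s : Nat) (h : s ≤ v.length) :
    (cs.zipIdx s).foldl (fun v q => inc q.2 q.1 (v ++ [0])) v
      = (cs.zipIdx s).foldl (fun v q => inc q.2 q.1 v) (v ++ List.replicate cs.length 0) := by
  induction cs generalizing v s with
  | nil => simp
  | cons c cs ih =>
    simp only [List.zipIdx_cons, List.foldl_cons]
    rw [ih (inc s c (v ++ [0])) (s + 1) (by simp [inc]; omega)]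
    congr 1
    simp only [List.length_cons]
    rw [show List.replicate (cs.length + 1) (0:Int) = 0 :: List.replicate cs.length 0 from rfl,
        show v ++ 0 :: List.replicate cs.length (0:Int) = (v ++ [0]) ++ List.replicate cs.length 0 by simp,
        inc_append s c (v ++ [0]) _ (by simp; omega)]

-- ===== VERDICT (by name: the statement is the Claim_ definition above) =====
theorem sumFE_spec : Claim_equal_sumFE := by
  intro data atribut _ hpre
  unfold Spec_sumFE
  show sumFE data atribut = sumFE_alt data atribut
  unfold sumFE sumFE_alt
  rw [sumFE_loop_eq_map _ _ hpre]
  refine List.map_congr_left (fun q _ => ?_)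
  refine congrArg (Prod.mk q.1) ?_
  have hA : (data.zipIdx).foldl (fun v p => inc p.2 ((p.1.count q.1 : Nat) : Int) (v ++ [0])) q.2
      = ((data.map (fun doc => ((doc.count q.1 : Nat) : Int))).zipIdx).foldl
          (fun v p => inc p.2 p.1 (v ++ [0])) q.2 := by
    rw [List.zipIdx_map, List.foldl_map]
    rfl
  have hB : ((data.map counterOf).zipIdx).foldl
        (fun l p => l.set p.2 (l.getD p.2 0 + cGet p.1 q.1)) (q.2 ++ List.replicate data.length 0)
      = ((data.map (fun doc => ((doc.count q.1 : Nat) : Int))).zipIdx).foldl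
          (fun v p => inc p.2 p.1 v) (q.2 ++ List.replicate data.length 0) := by
    rw [List.zipIdx_map, List.foldl_map, List.zipIdx_map, List.foldl_map]
    refine List.foldl_ext _ _ _ (fun l p _ => ?_)
    simp [inc, cGet_counterOf]
  rw [hA, hB, ← show (data.map (fun doc => ((doc.count q.1 : Nat) : Int))).length = data.length by simp]
  exact interleave _ q.2 0 (Nat.zero_le _)
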